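-- pv_equiv track=rewrite | github.com/julian10m/BGP-lies-detector | Functions.py | ASesInPathandOccurances
-- ===== SOURCE A (Python) =====
-- def ASesInPathandOccurances(RTASPath):
--
--     ASesinPath = []
--     for ind in range(0,len(RTASPath)):
--         CurrentAS = RTASPath[ind]
--         if CurrentAS != "*" and CurrentAS != "NA":
--             if CurrentAS not in ASesinPath:
--                 ASesinPath.append(CurrentAS)
--
--     CurrentHopsDist = []
--     for AS in ASesinPath:
--         for ind in range(0,len(RTASPath)):
--             if RTASPath[ind]==AS:
--                 Minind = ind
--                 break
--         for ind in range(len(RTASPath)-1,-1,-1):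
--             if RTASPath[ind]==AS:
--                 Maxind = ind
--                 break
--         to_substract = 0
--         for ind in range(Minind+1,Maxind):
--             CurrentAS=RTASPath[ind]
--             if CurrentAS!=AS and CurrentAS!="*" and CurrentAS!="NA":
--                 to_substract+=1
--         CurrentHopsDist.append(Maxind-Minind+1-to_substract)
--
--     return dict(zip(ASesinPath,CurrentHopsDist))
-- ===== SOURCE B (Python) =====
-- def ASesInPathandOccurances(RTASPath):
--     # One pass: per AS keep (count, invalid-count seen before its first occurrence,
--     # invalid-count seen before its last occurrence); the measure is then
--     # count + inv_at_last - inv_at_first, i.e. its occurrences plus the "*"/"NA"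
--     # hops strictly between its first and last occurrence. O(n) total.
--     stats = {}
--     inv = 0
--     for x in RTASPath:
--         if x == "*" or x == "NA":
--             inv += 1
--         else:
--             s = stats.get(x)
--             if s is None:
--                 stats[x] = (1, inv, inv)
--             else:
--                 stats[x] = (s[0] + 1, s[1], inv)
--     return {a: c + last - first for a, (c, first, last) in stats.items()}
-- ===== Notes on version B (the rewrite author's own statement) =====
-- stated objective: faster
-- what changed: A deduplicates and then, per AS, rescans the whole path forward, backward and over the span; B makes a single pass keeping a running invalid-hop counter and, per AS, a (count, inv-at-first, inv-at-last) triple, so each AS's measure is count + inv_at_last - inv_at_first with no rescans, no indices and no slices.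
import Mathlib
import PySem

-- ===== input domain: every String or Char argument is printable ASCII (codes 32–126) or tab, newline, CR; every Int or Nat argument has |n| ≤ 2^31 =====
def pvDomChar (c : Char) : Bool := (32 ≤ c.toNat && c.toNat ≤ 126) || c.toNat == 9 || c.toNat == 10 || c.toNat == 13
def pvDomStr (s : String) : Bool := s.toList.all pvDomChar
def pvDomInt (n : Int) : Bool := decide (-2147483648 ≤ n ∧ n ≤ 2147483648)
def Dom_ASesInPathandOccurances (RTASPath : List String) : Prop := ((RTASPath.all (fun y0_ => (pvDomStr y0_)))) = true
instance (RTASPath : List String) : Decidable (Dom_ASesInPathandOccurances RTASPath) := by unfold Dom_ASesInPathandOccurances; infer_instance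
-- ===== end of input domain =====

-- B replaces A's per-AS rescans by one pass that keeps a running invalid-hop counter
-- and a per-AS (count, inv-at-first, inv-at-last) triple; same return value.

-- ===== PORT A =====

-- per-AS body of A's second loop: first-index scan (break), last-index scan (break),
-- then the counting loop over range(Minind+1, Maxind).
-- The .getD 0 defaults are unreachable: AS always occurs in RTASPath.
def pvAval (RTASPath : List String) (AS : String) : Int :=
  let Minind : Int := ((PySem.List.pyRange 0 (RTASPath.length : Int) 1).foldl (fun st ind =>
      match st with
      | some _ => st
      | none => if PySem.List.pyGetD RTASPath ind "" == AS then some ind else none) none).getD 0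
  let Maxind : Int := ((PySem.List.pyRange ((RTASPath.length : Int) - 1) (-1) (-1)).foldl (fun st ind =>
      match st with
      | some _ => st
      | none => if PySem.List.pyGetD RTASPath ind "" == AS then some ind else none) none).getD 0
  let to_substract : Int := (PySem.List.pyRange (Minind + 1) Maxind 1).foldl (fun t ind =>
      let CurrentAS := PySem.List.pyGetD RTASPath ind ""
      if CurrentAS != AS && CurrentAS != "*" && CurrentAS != "NA" then t + 1 else t) 0
  Maxind - Minind + 1 - to_substract

-- dict(zip(ks, vs)) with pairwise-distinct keys ks is the zipped association list.
def ASesInPathandOccurances (RTASPath : List String) : List (String × Int) :=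
  let ASesinPath : List String :=
    (PySem.List.pyRange 0 (RTASPath.length : Int) 1).foldl (fun acc ind =>
      let CurrentAS := PySem.List.pyGetD RTASPath ind ""
      if CurrentAS != "*" && CurrentAS != "NA" then
        (if !(acc.contains CurrentAS) then acc ++ [CurrentAS] else acc)
      else acc) []
  let CurrentHopsDist : List Int := ASesinPath.map (pvAval RTASPath)
  ASesinPath.zip CurrentHopsDist

-- ===== PORT B =====

-- the loop body of B: bump the invalid counter, or create/update the AS's triple
def pvBstep (st : PySem.Dict String (Int × Int × Int) × Int) (x : String) :
    PySem.Dict String (Int × Int × Int) × Int :=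
  if x == "*" || x == "NA" then (st.1, st.2 + 1)
  else
    match st.1.get? x with
    | none => (st.1.insert x (1, st.2, st.2), st.2)
    | some s => (st.1.insert x (s.1 + 1, s.2.1, st.2), st.2)

-- the final dict comprehension iterates stats.items(), whose keys are already
-- distinct, so its items are exactly the mapped items list
def ASesInPathandOccurances_alt (RTASPath : List String) : List (String × Int) :=
  let st := RTASPath.foldl pvBstep (PySem.Dict.empty, 0)
  st.1.items.map (fun p => (p.1, p.2.1 + p.2.2.2 - p.2.2.1))

-- ===== PRECONDITION & SPEC =====
def Spec_ASesInPathandOccurances (RTASPath : List String) (out : List (String × Int)) : Prop := out = ASesInPathandOccurances_alt RTASPath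
instance (RTASPath : List String) (out : List (String × Int)) : Decidable (Spec_ASesInPathandOccurances RTASPath out) := by unfold Spec_ASesInPathandOccurances; infer_instance

-- ===== CLAIM (what is proved, stated in full; the proofs are below) =====
def Claim_equal_ASesInPathandOccurances : Prop := ∀ (RTASPath : List String), Dom_ASesInPathandOccurances RTASPath → Spec_ASesInPathandOccurances RTASPath (ASesInPathandOccurances RTASPath)

-- ===== LEMMAS AND PROOFS =====

def pvValid (x : String) : Bool := x != "*" && x != "NA"
def pvInv (x : String) : Bool := x == "*" || x == "NA"

theorem pvValid_eq_not_inv (x : String) : pvValid x = !(pvInv x) := by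
  simp [pvValid, pvInv, bne, Bool.not_or]

-- number of invalid hops in a list
def pvI (l : List String) : Int := (l.countP pvInv : Int)

-- invalid hops strictly before the first occurrence of x
def pvInvTo (x : String) : List String → Int
  | [] => 0
  | y :: t => if y == x then 0 else (if pvInv y then 1 else 0) + pvInvTo x t

-- the triple B's dict holds for key x after processing pre
def pvStat (pre : List String) (x : String) : Int × Int × Int :=
  ((pre.count x : Int), pvInvTo x pre, pvI pre - pvInvTo x pre.reverse)

-- ordered keep-first dedup of the valid entries, parametrised by the already-seen keys
def pvDkeys (seen : List String) : List String → List String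
  | [] => []
  | x :: t => if pvValid x && !(seen.contains x) then x :: pvDkeys (x :: seen) t else pvDkeys seen t

-- the same keys, as a left fold (B's insertion order)
def pvKeys (pre : List String) : List String :=
  pre.foldl (fun acc x => if pvValid x && !(acc.contains x) then acc ++ [x] else acc) []

theorem pvDkeys_congr (seen1 seen2 : List String) (t : List String)
    (h : ∀ y, (y ∈ seen1) ↔ (y ∈ seen2)) : pvDkeys seen1 t = pvDkeys seen2 t := by
  induction t generalizing seen1 seen2 with
  | nil => rfl
  | cons x t ih =>
    have hc : seen1.contains x = seen2.contains x := by
      simp [h]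
    simp only [pvDkeys, hc]
    by_cases hb : (pvValid x && !(seen2.contains x)) = true
    · simp only [hb, if_true]
      refine congrArg _ (ih _ _ ?_)
      intro y; simp [h]
    · simp only [hb]
      exact ih _ _ h

theorem A_keys_fold (t : List String) : ∀ acc : List String,
    t.foldl (fun acc x =>
      if x != "*" && x != "NA" then
        (if !(acc.contains x) then acc ++ [x] else acc)
      else acc) acc = acc ++ pvDkeys acc t := by
  induction t with
  | nil => intro acc; simp [pvDkeys]
  | cons x t ih =>
    intro acc
    rw [List.foldl_cons]
    by_cases hv : (x != "*" && x != "NA") = true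
    · by_cases hm : acc.contains x = true
      · have hm' : x ∈ acc := by simpa using hm
        have hstep : (if (x != "*" && x != "NA") = true then
            (if (!(acc.contains x)) = true then acc ++ [x] else acc) else acc) = acc := by
          simp [hv, hm']
        have hk : pvDkeys acc (x :: t) = pvDkeys acc t := by
          simp [pvDkeys, pvValid, hv, hm']
        rw [hstep, ih acc, hk]
      · have hm' : x ∉ acc := by
          rw [Bool.not_eq_true] at hm; simpa using hm
        have hstep : (if (x != "*" && x != "NA") = true then
            (if (!(acc.contains x)) = true then acc ++ [x] else acc) else acc) = acc ++ [x] := by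
          simp [hv, hm']
        have hk : pvDkeys acc (x :: t) = x :: pvDkeys (x :: acc) t := by
          simp [pvDkeys, pvValid, hv, hm']
        have hc : pvDkeys (acc ++ [x]) t = pvDkeys (x :: acc) t := by
          refine pvDkeys_congr _ _ _ ?_
          intro y; simp [or_comm]
        rw [hstep, ih (acc ++ [x]), hk, hc]
        simp
    · have hstep : (if (x != "*" && x != "NA") = true then
          (if (!(acc.contains x)) = true then acc ++ [x] else acc) else acc) = acc := by
        simp [hv]
      have hk : pvDkeys acc (x :: t) = pvDkeys acc t := by
        simp [pvDkeys, pvValid, hv]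
      rw [hstep, ih acc, hk]

theorem pvKeys_eq_pvDkeys (l : List String) : pvKeys l = pvDkeys [] l := by
  have hf : (fun (acc : List String) (x : String) =>
      if pvValid x && !(acc.contains x) then acc ++ [x] else acc)
      = (fun acc x => if x != "*" && x != "NA" then
          (if !(acc.contains x) then acc ++ [x] else acc) else acc) := by
    funext acc x
    by_cases hv : (x != "*" && x != "NA") = true
    · by_cases hc : acc.contains x = true <;> simp [pvValid, hv]
    · simp [pvValid, hv]
  unfold pvKeys
  rw [hf, A_keys_fold]
  simp

theorem mem_pvDkeys (x : String) (t : List String) : ∀ seen,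
    x ∈ pvDkeys seen t ↔ pvValid x = true ∧ x ∈ t ∧ x ∉ seen := by
  induction t with
  | nil => intro seen; simp [pvDkeys]
  | cons y t ih =>
    intro seen
    simp only [pvDkeys]
    by_cases hb : (pvValid y && !(seen.contains y)) = true
    · rw [if_pos hb]
      have hvy : pvValid y = true ∧ y ∉ seen := by simpa using hb
      constructor
      · intro h
        rcases List.mem_cons.1 h with h | h
        · subst h; exact ⟨hvy.1, by simp, hvy.2⟩
        · obtain ⟨h1, h2, h3⟩ := (ih (y :: seen)).1 h
          exact ⟨h1, by simp [h2], fun hm => h3 (by simp [hm])⟩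
      · rintro ⟨h1, h2, h3⟩
        rcases List.mem_cons.1 h2 with h | h
        · subst h; exact List.mem_cons_self ..
        · by_cases hxy : x = y
          · subst hxy; exact List.mem_cons_self ..
          · exact List.mem_cons_of_mem _ ((ih (y :: seen)).2 ⟨h1, h, by simp [hxy, h3]⟩)
    · rw [if_neg hb, ih seen]
      have hb' : pvValid y = false ∨ y ∈ seen := by
        by_cases hv : pvValid y = true
        · right
          have hc : ¬ ((!(seen.contains y)) = true) := fun hc => hb (by rw [hv, hc]; rfl)
          simpa using hc
        · left; simpa using hv
      constructor
      · rintro ⟨h1, h2, h3⟩; exact ⟨h1, by simp [h2], h3⟩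
      · rintro ⟨h1, h2, h3⟩
        rcases List.mem_cons.1 h2 with h | h
        · subst h
          rcases hb' with h | h
          · exact absurd h1 (by simp [h])
          · exact absurd h h3
        · exact ⟨h1, h, h3⟩

theorem mem_pvKeys (x : String) (l : List String) :
    x ∈ pvKeys l ↔ pvValid x = true ∧ x ∈ l := by
  rw [pvKeys_eq_pvDkeys, mem_pvDkeys]
  simp

theorem pvKeys_append_singleton (pre : List String) (y : String) :
    pvKeys (pre ++ [y]) =
      if pvValid y && !((pvKeys pre).contains y) then pvKeys pre ++ [y] else pvKeys pre := by
  unfold pvKeys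
  rw [List.foldl_append]
  rfl

theorem pvI_append (l r : List String) : pvI (l ++ r) = pvI l + pvI r := by
  simp [pvI, List.countP_append]

theorem pvI_cons (y : String) (r : List String) :
    pvI (y :: r) = (if pvInv y then 1 else 0) + pvI r := by
  by_cases h : pvInv y = true <;> simp [pvI, List.countP_cons, h] <;> omega

theorem pvI_reverse (l : List String) : pvI l.reverse = pvI l := by
  simp [pvI]

theorem pvInvTo_cons (x y : String) (t : List String) :
    pvInvTo x (y :: t) = if y == x then 0 else (if pvInv y then 1 else 0) + pvInvTo x t := rfl

theorem pvInvTo_append_of_mem (x : String) (pre r : List String) (h : x ∈ pre) :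
    pvInvTo x (pre ++ r) = pvInvTo x pre := by
  induction pre with
  | nil => simp at h
  | cons y t ih =>
    by_cases hxy : y = x
    · simp [pvInvTo_cons, hxy]
    · rcases List.mem_cons.1 h with h' | h'
      · exact absurd h'.symm hxy
      · simp [pvInvTo_cons, hxy, ih h']

theorem pvInvTo_append_of_not_mem (x : String) (pre r : List String) (h : x ∉ pre) :
    pvInvTo x (pre ++ r) = pvI pre + pvInvTo x r := by
  induction pre with
  | nil => simp [pvI]
  | cons y t ih =>
    have hxy : y ≠ x := fun he => h (by simp [he])
    have ht : x ∉ t := fun hm => h (by simp [hm])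
    rw [List.cons_append, pvInvTo_cons, if_neg (by simpa using hxy), ih ht, pvI_cons]
    ring

theorem pvInvTo_cons_self (x : String) (t : List String) : pvInvTo x (x :: t) = 0 := by
  simp [pvInvTo_cons]

-- a valid string differs from any invalid one
theorem pvValid_ne_inv (x y : String) (hx : pvValid x = true) (hy : pvInv y = true) : x ≠ y := by
  intro he
  subst he
  rw [pvValid_eq_not_inv, hy] at hx
  simp at hx

theorem pvStat_append_singleton_ne (pre : List String) (x y : String)
    (hne : x ≠ y) (hm : x ∈ pre) : pvStat (pre ++ [y]) x = pvStat pre x := by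
  unfold pvStat
  have h1 : (pre ++ [y]).count x = pre.count x := by
    simp [List.count_append, List.count_singleton, Ne.symm hne]
  have h2 : pvInvTo x (pre ++ [y]) = pvInvTo x pre := pvInvTo_append_of_mem x pre [y] hm
  have h3 : pvInvTo x (pre ++ [y]).reverse = (if pvInv y then 1 else 0) + pvInvTo x pre.reverse := by
    rw [List.reverse_append]
    simp only [List.reverse_singleton, List.singleton_append]
    rw [pvInvTo_cons, if_neg (by simpa using (Ne.symm hne))]
  rw [h1, h2, h3, pvI_append]
  have : pvI [y] = (if pvInv y then 1 else 0) := by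
    by_cases h : pvInv y = true <;> simp [pvI, h]
  rw [this]
  refine congrArg _ (congrArg _ ?_)
  ring

theorem pvStat_append_singleton_self (pre : List String) (y : String) (hv : pvInv y = false) :
    pvStat (pre ++ [y]) y = ((pre.count y : Int) + 1, pvInvTo y (pre ++ [y]), pvI pre) := by
  unfold pvStat
  have h1 : ((pre ++ [y]).count y : Int) = (pre.count y : Int) + 1 := by
    simp [List.count_append]
  have h3 : pvInvTo y (pre ++ [y]).reverse = 0 := by
    rw [List.reverse_append]
    simp only [List.reverse_singleton, List.singleton_append]
    exact pvInvTo_cons_self y pre.reverse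
  rw [h1, h3, pvI_append]
  have : pvI [y] = 0 := by simp [pvI, hv]
  rw [this]
  refine congrArg _ (congrArg _ ?_)
  ring

-- lookup in a dict literally built as a map over keys
theorem get?_mk_map (ks : List String) (f : String → Int × Int × Int) (x : String) :
    (PySem.Dict.mk (ks.map (fun k => (k, f k)))).get? x
      = if x ∈ ks then some (f x) else none := by
  induction ks with
  | nil => simp [PySem.Dict.get?]
  | cons k t ih =>
    rw [List.map_cons, PySem.Dict.get?_mk_cons, ih]
    by_cases h : k = x
    · simp [h]
    · simp [h, Ne.symm h]

-- B's fold invariant: after processing pre, the state is the per-key stats and the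
-- running invalid count
theorem B_fold (t : List String) : ∀ pre : List String,
    t.foldl pvBstep
      (PySem.Dict.mk ((pvKeys pre).map (fun k => (k, pvStat pre k))), pvI pre)
    = (PySem.Dict.mk ((pvKeys (pre ++ t)).map (fun k => (k, pvStat (pre ++ t) k))),
        pvI (pre ++ t)) := by
  induction t with
  | nil => intro pre; simp
  | cons y t ih =>
    intro pre
    rw [List.foldl_cons]
    have hassoc : pre ++ y :: t = (pre ++ [y]) ++ t := by simp
    have hstep : pvBstep
        (PySem.Dict.mk ((pvKeys pre).map (fun k => (k, pvStat pre k))), pvI pre) y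
        = (PySem.Dict.mk ((pvKeys (pre ++ [y])).map (fun k => (k, pvStat (pre ++ [y]) k))),
            pvI (pre ++ [y])) := by
      by_cases hinv : pvInv y = true
      · -- invalid hop: only the counter moves
        have hvly : pvValid y = false := by rw [pvValid_eq_not_inv, hinv]; rfl
        have hcond : (y == "*" || y == "NA") = true := hinv
        have hkeys : pvKeys (pre ++ [y]) = pvKeys pre := by
          rw [pvKeys_append_singleton, hvly]
          simp
        have hmap : (pvKeys pre).map (fun k => (k, pvStat (pre ++ [y]) k))
            = (pvKeys pre).map (fun k => (k, pvStat pre k)) := by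
          refine List.map_congr_left ?_
          intro k hk
          obtain ⟨hkv, hkm⟩ := (mem_pvKeys k pre).1 hk
          rw [pvStat_append_singleton_ne pre k y (pvValid_ne_inv k y hkv hinv) hkm]
        have hI : pvI (pre ++ [y]) = pvI pre + 1 := by
          rw [pvI_append]
          simp [pvI, hinv]
        simp only [pvBstep, hcond, if_true, hkeys, hmap, hI]
      · -- valid hop
        have hinv' : pvInv y = false := by simpa using hinv
        have hvly : pvValid y = true := by rw [pvValid_eq_not_inv, hinv']; rfl
        have hcond : (y == "*" || y == "NA") = false := hinv'
        have hI : pvI (pre ++ [y]) = pvI pre := by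
          rw [pvI_append]
          simp [pvI, hinv']
        have hget : (PySem.Dict.mk ((pvKeys pre).map (fun k => (k, pvStat pre k)))).get? y
            = if y ∈ pvKeys pre then some (pvStat pre y) else none := get?_mk_map _ _ _
        by_cases hmem : y ∈ pvKeys pre
        · -- existing key: overwrite in place
          have hypre : y ∈ pre := ((mem_pvKeys y pre).1 hmem).2
          have hkeys : pvKeys (pre ++ [y]) = pvKeys pre := by
            have hct : (pvKeys pre).contains y = true := by simpa using hmem
            rw [pvKeys_append_singleton, hct]
            simp
          have hgs : (PySem.Dict.mk ((pvKeys pre).map (fun k => (k, pvStat pre k)))).get? y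
              = some (pvStat pre y) := by rw [hget, if_pos hmem]
          have hcont : (PySem.Dict.mk ((pvKeys pre).map (fun k => (k, pvStat pre k)))).contains y = true := by
            rw [PySem.Dict.contains_eq_isSome_get?, hgs]; rfl
          simp only [pvBstep, hcond, Bool.false_eq_true, if_false, hgs, hkeys, hI]
          refine congrArg (fun d => (d, pvI pre)) ?_
          refine PySem.Dict.ext ?_
          rw [PySem.Dict.items_insert_of_contains _ _ hcont]
          show List.map _ (List.map _ (pvKeys pre)) = _
          rw [List.map_map]
          refine List.map_congr_left ?_
          intro k hk
          obtain ⟨hkv, hkm⟩ := (mem_pvKeys k pre).1 hk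
          by_cases hky : k = y
          · subst hky
            simp only [Function.comp_apply, beq_self_eq_true, if_true]
            rw [pvStat_append_singleton_self pre k hinv']
            unfold pvStat
            have h2 : pvInvTo k (pre ++ [k]) = pvInvTo k pre :=
              pvInvTo_append_of_mem k pre [k] hkm
            rw [h2]
          · have hbk : (k == y) = false := by simpa using hky
            simp only [Function.comp_apply, hbk, Bool.false_eq_true, if_false]
            rw [pvStat_append_singleton_ne pre k y hky hkm]
        · -- new key: append
          have hypre : y ∉ pre := fun hm => hmem ((mem_pvKeys y pre).2 ⟨hvly, hm⟩)
          have hkeys : pvKeys (pre ++ [y]) = pvKeys pre ++ [y] := by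
            have hcf : (pvKeys pre).contains y = false := by simpa using hmem
            rw [pvKeys_append_singleton, hcf, hvly]
            simp
          have hgs : (PySem.Dict.mk ((pvKeys pre).map (fun k => (k, pvStat pre k)))).get? y
              = none := by rw [hget, if_neg hmem]
          have hcont : (PySem.Dict.mk ((pvKeys pre).map (fun k => (k, pvStat pre k)))).contains y = false := by
            rw [PySem.Dict.contains_eq_isSome_get?, hgs]; rfl
          simp only [pvBstep, hcond, Bool.false_eq_true, if_false, hgs, hkeys, hI]
          refine congrArg (fun d => (d, pvI pre)) ?_
          refine PySem.Dict.ext ?_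
          rw [PySem.Dict.items_insert_of_not_contains _ _ hcont]
          show List.map _ (pvKeys pre) ++ [(y, (1, pvI pre, pvI pre))]
              = List.map _ (pvKeys pre ++ [y])
          rw [List.map_append]
          have hmap : (pvKeys pre).map (fun k => (k, pvStat pre k))
              = (pvKeys pre).map (fun k => (k, pvStat (pre ++ [y]) k)) := by
            refine List.map_congr_left ?_
            intro k hk
            obtain ⟨hkv, hkm⟩ := (mem_pvKeys k pre).1 hk
            have hky : k ≠ y := fun he => hypre (he ▸ hkm)
            rw [pvStat_append_singleton_ne pre k y hky hkm]
          rw [hmap]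
          refine congrArg _ ?_
          have hc0 : (pre.count y : Int) = 0 := by
            simp [List.count_eq_zero_of_not_mem hypre]
          have hto : pvInvTo y (pre ++ [y]) = pvI pre := by
            rw [pvInvTo_append_of_not_mem y pre [y] hypre, pvInvTo_cons_self]
            ring
          rw [List.map_singleton, pvStat_append_singleton_self pre y hinv', hc0, hto]
          norm_num
    rw [hstep, hassoc]
    exact ih (pre ++ [y])

-- first-match fold (a for-loop with break) is List.find?
theorem foldl_firstmatch_some (L : List Int) (p : Int → Bool) (v : Int) :
    L.foldl (fun st ind =>
      match st with
      | some _ => st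
      | none => if p ind then some ind else none) (some v) = some v := by
  induction L with
  | nil => rfl
  | cons a L ih => simpa using ih

theorem foldl_firstmatch (L : List Int) (p : Int → Bool) :
    L.foldl (fun st ind =>
      match st with
      | some _ => st
      | none => if p ind then some ind else none) none = L.find? p := by
  induction L with
  | nil => rfl
  | cons a L ih =>
    by_cases h : p a
    · simp [List.find?, h, foldl_firstmatch_some]
    · simp [List.find?, h, ih]

-- element of the concatenation at the marked position
theorem pvGetD_mark (pre suf : List String) (x : String) :
    PySem.List.pyGetD (pre ++ x :: suf) (pre.length : Int) "" = x := by
  rw [PySem.List.pyGetD_eq_getElem _ _ (by positivity) (by simp)]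
  simp

theorem pvGetD_left (pre suf : List String) (x : String) (a : Int)
    (h0 : 0 ≤ a) (h1 : a < (pre.length : Int)) :
    PySem.List.pyGetD (pre ++ x :: suf) a "" = pre[a.toNat]'(by omega) := by
  rw [PySem.List.pyGetD_eq_getElem _ _ h0 (by simp; omega)]
  exact List.getElem_append_left (by omega)

-- A's forward break-scan finds the marked position when x does not occur before it
theorem find_first (pre suf : List String) (x : String) (hpre : x ∉ pre) :
    (PySem.List.pyRange 0 (((pre ++ x :: suf).length : Int)) 1).find?
      (fun ind => PySem.List.pyGetD (pre ++ x :: suf) ind "" == x) = some (pre.length : Int) := by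
  have hlen : ((pre ++ x :: suf).length : Int) = (pre.length : Int) + 1 + (suf.length : Int) := by
    push_cast [List.length_append, List.length_cons]; ring
  rw [PySem.List.pyRange_one_append 0 (pre.length : Int) _ (by positivity) (by omega)]
  rw [List.find?_append]
  have h1 : (PySem.List.pyRange 0 (pre.length : Int) 1).find?
      (fun ind => PySem.List.pyGetD (pre ++ x :: suf) ind "" == x) = none := by
    rw [List.find?_eq_none]
    intro a ha
    obtain ⟨ha0, halt⟩ := PySem.List.mem_pyRange_one.1 ha
    rw [pvGetD_left pre suf x a ha0 halt]
    simp only [beq_iff_eq]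
    intro he
    exact hpre (he ▸ List.getElem_mem _)
  rw [h1]
  rw [PySem.List.pyRange_one_cons (by omega : (pre.length : Int) < ((pre ++ x :: suf).length : Int))]
  rw [List.find?_cons_of_pos]
  · rfl
  · simp [pvGetD_mark pre suf x]

-- A's backward break-scan finds the marked position when x does not occur after it
theorem find_last (pre suf : List String) (x : String) (hsuf : x ∉ suf) :
    (PySem.List.pyRange (((pre ++ x :: suf).length : Int) - 1) (-1) (-1)).find?
      (fun ind => PySem.List.pyGetD (pre ++ x :: suf) ind "" == x) = some (pre.length : Int) := by
  have hlen : ((pre ++ x :: suf).length : Int) = (pre.length : Int) + 1 + (suf.length : Int) := by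
    push_cast [List.length_append, List.length_cons]; ring
  rw [PySem.List.pyRange_neg_one_eq_reverse]
  have he : (-1 : Int) + 1 = 0 := by norm_num
  rw [he]
  have he2 : ((pre ++ x :: suf).length : Int) - 1 + 1 = ((pre ++ x :: suf).length : Int) := by ring
  rw [he2]
  rw [PySem.List.pyRange_one_append 0 ((pre.length : Int) + 1) _ (by positivity) (by omega)]
  rw [List.reverse_append, List.find?_append]
  have h1 : ((PySem.List.pyRange ((pre.length : Int) + 1) ((pre ++ x :: suf).length : Int) 1).reverse).find?
      (fun ind => PySem.List.pyGetD (pre ++ x :: suf) ind "" == x) = none := by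
    rw [List.find?_eq_none]
    intro a ha
    rw [List.mem_reverse] at ha
    obtain ⟨ha0, halt⟩ := PySem.List.mem_pyRange_one.1 ha
    rw [PySem.List.pyGetD_eq_getElem _ _ (by omega) (by omega)]
    have hge : pre.length + 1 ≤ a.toNat := by omega
    rw [List.getElem_append_right (by omega)]
    simp only [beq_iff_eq]
    intro hex
    apply hsuf
    rw [List.getElem_cons] at hex
    rw [dif_neg (by omega)] at hex
    exact hex ▸ List.getElem_mem _
  rw [h1]
  rw [PySem.List.pyRange_one_succ_right (by positivity : (0:Int) ≤ (pre.length : Int))]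
  rw [List.reverse_append]
  simp only [List.reverse_singleton, List.singleton_append, List.find?_cons]
  rw [show (PySem.List.pyGetD (pre ++ x :: suf) (pre.length : Int) "" == x) = true by
    simp [pvGetD_mark pre suf x]]
  rfl

theorem find_first' (l pre suf : List String) (x : String)
    (hl : l = pre ++ x :: suf) (hpre : x ∉ pre) :
    (PySem.List.pyRange 0 ((l.length : Int)) 1).find?
      (fun ind => PySem.List.pyGetD l ind "" == x) = some (pre.length : Int) := by
  subst hl; exact find_first pre suf x hpre

theorem find_last' (l pre2 s : List String) (x : String)
    (hl : l = pre2 ++ x :: s) (hs : x ∉ s) :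
    (PySem.List.pyRange ((l.length : Int) - 1) (-1) (-1)).find?
      (fun ind => PySem.List.pyGetD l ind "" == x) = some (pre2.length : Int) := by
  subst hl; exact find_last pre2 s x hs

-- the counting loop over the open interval sees exactly the middle block m
theorem countP_range_mid (p : String → Bool) (l pre rest m : List String) (x : String)
    (hl : l = pre ++ x :: (m ++ rest)) :
    ((PySem.List.pyRange ((pre.length : Int) + 1) ((pre.length : Int) + 1 + (m.length : Int)) 1).countP
      (fun ind => p (PySem.List.pyGetD l ind ""))) = m.countP p := by
  subst hl
  rw [PySem.List.pyRange_one, List.countP_map]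
  have hbm : (((pre.length : Int) + 1 + (m.length : Int)) - ((pre.length : Int) + 1)).toNat = m.length := by
    omega
  rw [hbm]
  have hmap : (List.range m.length).map
      (fun (k : Nat) => PySem.List.pyGetD (pre ++ x :: (m ++ rest)) ((pre.length : Int) + 1 + (k : Int)) "") = m := by
    apply List.ext_getElem
    · simp
    · intro k h1 h2
      simp only [List.getElem_map, List.getElem_range]
      have hk : k < m.length := by simpa using h1
      rw [PySem.List.pyGetD_eq_getElem _ _ (by omega)
        (by simp only [List.length_append, List.length_cons]; push_cast; omega)]
      have ht : ((pre.length : Int) + 1 + (k : Int)).toNat = pre.length + 1 + k := by omega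
      simp only [ht]
      rw [List.getElem_append_right (by omega)]
      rw [List.getElem_cons]
      rw [dif_neg (by omega)]
      rw [List.getElem_append_left (by omega)]
      congr 1
      omega
  conv_rhs => rw [← hmap]
  rw [List.countP_map]
  rfl

-- every hop is exactly one of: equal to x, invalid, or a different valid AS
theorem counts_split (m : List String) (x : String) (h1 : x ≠ "*") (h2 : x ≠ "NA") :
    (m.length : Int) = (m.countP (fun c => c != x && c != "*" && c != "NA") : Int)
      + (m.count x : Int) + pvI m := by
  induction m with
  | nil => simp [pvI]
  | cons c m ih =>
    rw [pvI_cons] at *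
    simp only [List.length_cons, List.countP_cons, List.count_cons]
    by_cases hcx : c = x
    · subst hcx; simp [h1, h2, pvInv]; push_cast; omega
    · by_cases hcs : c = "*"
      · subst hcs; simp [Ne.symm h1, hcx, pvInv]; push_cast; omega
      · by_cases hcn : c = "NA"
        · subst hcn; simp [Ne.symm h2, hcx, hcs, pvInv]; push_cast; omega
        · have hinv : pvInv c = false := by simp [pvInv, hcs, hcn]
          simp [hcx, hcs, hcn, hinv]; push_cast; omega

-- core value lemma: A's span formula equals the value B derives from its triple
theorem val_eq (l : List String) (x : String)
    (hv : pvValid x = true) (hm : x ∈ l) :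
    pvAval l x = (pvStat l x).1 + (pvStat l x).2.2 - (pvStat l x).2.1 := by
  have hx12 : x ≠ "*" ∧ x ≠ "NA" := by simpa [pvValid] using hv
  obtain ⟨hx1, hx2⟩ := hx12
  have hxinv : pvInv x = false := by simp [pvInv, hx1, hx2]
  -- first-occurrence decomposition
  obtain ⟨pre, suf, hl, hpre⟩ : ∃ pre suf, l = pre ++ x :: suf ∧ x ∉ pre := by
    have hsome : ∃ k, PySem.List.index? l x = some k := by
      rw [← Option.isSome_iff_exists, PySem.List.index?_isSome_iff]; exact hm
    obtain ⟨k, hk⟩ := hsome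
    obtain ⟨pre, suf, h1, _, h3⟩ := (PySem.List.index?_eq_some_iff l x k).1 hk
    exact ⟨pre, suf, h1, h3⟩
  by_cases hmem : x ∈ suf
  · -- at least two occurrences: split off the last one
    obtain ⟨m, s, hsuf, hs⟩ : ∃ m s, suf = m ++ x :: s ∧ x ∉ s := by
      have hrev : x ∈ suf.reverse := by simpa using hmem
      have hsome : ∃ k, PySem.List.index? suf.reverse x = some k := by
        rw [← Option.isSome_iff_exists, PySem.List.index?_isSome_iff]; exact hrev
      obtain ⟨k, hk⟩ := hsome
      obtain ⟨p, q, h1, _, h3⟩ := (PySem.List.index?_eq_some_iff suf.reverse x k).1 hk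
      refine ⟨q.reverse, p.reverse, ?_, by simpa using h3⟩
      have := congrArg List.reverse h1
      simpa using this
    subst hsuf
    have hassoc : pre ++ x :: (m ++ x :: s) = (pre ++ x :: m) ++ x :: s := by simp
    have hlen2 : ((pre ++ x :: m).length : Int) = (pre.length : Int) + 1 + (m.length : Int) := by
      push_cast [List.length_append, List.length_cons]; ring
    -- A's side
    have hA : pvAval l x = (m.length : Int) + 2
        - (m.countP (fun c => c != x && c != "*" && c != "NA") : Int) := by
      simp only [pvAval]
      rw [foldl_firstmatch, foldl_firstmatch]
      rw [find_first' _ pre (m ++ x :: s) x hl hpre]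
      rw [find_last' _ (pre ++ x :: m) s x (by rw [hl, hassoc]) hs]
      simp only [Option.getD_some]
      rw [PySem.List.foldl_if_add_one
        (fun ind => (PySem.List.pyGetD l ind "" != x
          && PySem.List.pyGetD l ind "" != "*")
          && PySem.List.pyGetD l ind "" != "NA")]
      rw [hlen2]
      rw [countP_range_mid (fun c => (c != x && c != "*") && c != "NA") _ pre (x :: s) m x hl]
      push_cast
      ring
    -- B's side
    have hstat1 : (pvStat l x).1 = (m.count x : Int) + 2 := by
      unfold pvStat
      rw [hl]
      simp [List.count_append, List.count_cons, List.count_eq_zero_of_not_mem hpre,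
        List.count_eq_zero_of_not_mem hs]
      push_cast
      ring
    have hstat2 : (pvStat l x).2.1 = pvI pre := by
      unfold pvStat
      show pvInvTo x l = pvI pre
      rw [hl, pvInvTo_append_of_not_mem x pre _ hpre, pvInvTo_cons_self]
      ring
    have hstat3 : (pvStat l x).2.2 = pvI pre + pvI m := by
      unfold pvStat
      show pvI l - pvInvTo x l.reverse = pvI pre + pvI m
      have hrev : l.reverse = s.reverse ++ x :: (m.reverse ++ x :: pre.reverse) := by
        rw [hl]; simp
      have hto : pvInvTo x l.reverse = pvI s.reverse := by
        rw [hrev, pvInvTo_append_of_not_mem x s.reverse _ (by simpa using hs),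
          pvInvTo_cons_self]
        ring
      rw [hto, pvI_reverse, hl, pvI_append, pvI_cons, pvI_append, pvI_cons, hxinv]
      simp
      ring
    rw [hA, hstat1, hstat2, hstat3]
    have := counts_split m x hx1 hx2
    omega
  · -- single occurrence
    have hA : pvAval l x = 1 := by
      simp only [pvAval]
      rw [foldl_firstmatch, foldl_firstmatch]
      rw [find_first' _ pre suf x hl hpre]
      rw [find_last' _ pre suf x hl hmem]
      simp only [Option.getD_some]
      rw [PySem.List.pyRange_one_eq_nil (by omega)]
      simp
    have hstat1 : (pvStat l x).1 = 1 := by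
      unfold pvStat
      rw [hl]
      simp [List.count_append, List.count_cons, List.count_eq_zero_of_not_mem hpre,
        List.count_eq_zero_of_not_mem hmem]
    have hstat2 : (pvStat l x).2.1 = pvI pre := by
      unfold pvStat
      show pvInvTo x l = pvI pre
      rw [hl, pvInvTo_append_of_not_mem x pre _ hpre, pvInvTo_cons_self]
      ring
    have hstat3 : (pvStat l x).2.2 = pvI pre := by
      unfold pvStat
      show pvI l - pvInvTo x l.reverse = pvI pre
      have hrev : l.reverse = suf.reverse ++ x :: pre.reverse := by rw [hl]; simp
      have hto : pvInvTo x l.reverse = pvI suf.reverse := by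
        rw [hrev, pvInvTo_append_of_not_mem x suf.reverse _ (by simpa using hmem),
          pvInvTo_cons_self]
        ring
      rw [hto, pvI_reverse, hl, pvI_append, pvI_cons, hxinv]
      simp
    rw [hA, hstat1, hstat2, hstat3]
    ring

-- ===== VERDICT (by name: the statement is the Claim_ definition above) =====
theorem ASesInPathandOccurances_spec : Claim_equal_ASesInPathandOccurances := by
  intro l _
  unfold Spec_ASesInPathandOccurances
  have hA : ASesInPathandOccurances l = (pvDkeys [] l).map (fun AS => (AS, pvAval l AS)) := by
    unfold ASesInPathandOccurances
    rw [PySem.List.foldl_pyRange_zero_pyGetD' l ""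
        (fun acc c => if c != "*" && c != "NA" then
          (if !(acc.contains c) then acc ++ [c] else acc) else acc) []]
    rw [A_keys_fold l []]
    simp only [List.nil_append]
    exact List.map_prod_left_eq_zip.symm
  have hB : ASesInPathandOccurances_alt l = (pvDkeys [] l).map (fun AS => (AS, pvAval l AS)) := by
    unfold ASesInPathandOccurances_alt
    have h0 : (PySem.Dict.empty, (0 : Int))
        = (PySem.Dict.mk ((pvKeys ([] : List String)).map (fun k => (k, pvStat [] k))), pvI []) := by
      simp [pvKeys, pvI]
      rfl
    rw [h0, B_fold l [], List.nil_append]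
    show List.map _ (List.map _ (pvKeys l)) = _
    rw [List.map_map, ← pvKeys_eq_pvDkeys]
    refine List.map_congr_left ?_
    intro k hk
    obtain ⟨hkv, hkm⟩ := (mem_pvKeys k l).1 hk
    simp only [Function.comp_apply]
    rw [val_eq l k hkv hkm]
  rw [hA, hB]
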